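-- pv_equiv track=rewrite | github.com/codemed7-git/CodeRamzay | utils.py | create_encryption_matrix
-- ===== SOURCE A (Python) =====
-- from math import ceil
-- from typing import Dict, List, Tuple
--
-- ALPHABET_SIZE = 28  # Размер алфавита (26 букв + '/' + '.')
--
-- ENGLISH_ALPHABET = 'abcdefghijklmnopqrstuvwxyz/.'
--
-- def create_encryption_matrix(key: str) -> List[List[str]]:
--     eng_dict = ENGLISH_ALPHABET
--     matrix = [['*' for _ in range(len(key))] for _ in range(ceil(ALPHABET_SIZE / len(key)))]
--
--     # Заполнение первой строки ключом
--     remaining_chars = list(eng_dict)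
--     for ind, char in enumerate(key):
--         if char in remaining_chars:
--             remaining_chars.remove(char)
--         matrix[0][ind] = char
--
--     # Заполнение таблицы оставшимися элементами
--     char_index = 0
--     for i in range(1, len(matrix)):
--         for j in range(len(key)):
--             if char_index >= len(remaining_chars):
--                 break
--             matrix[i][j] = remaining_chars[char_index]
--             char_index += 1
--
--     return matrix
-- ===== SOURCE B (Python) =====
-- from math import ceil
--
-- ALPHABET_SIZE = 28
-- ENGLISH_ALPHABET = 'abcdefghijklmnopqrstuvwxyz/.'
--
-- def create_encryption_matrix(key: str):
--     cols = len(key)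
--     rows = ceil(ALPHABET_SIZE / cols)
--     remaining = [c for c in ENGLISH_ALPHABET if c not in key]
--     matrix = [list(key)]
--     for r in range(rows - 1):
--         chunk = remaining[r * cols:(r + 1) * cols]
--         matrix.append(chunk + ['*'] * (cols - len(chunk)))
--     return matrix
-- ===== Notes on version B (the rewrite author's own statement) =====
-- stated objective: simpler
-- what changed: A's two separate fill loops (first-row loop with remove-once on remaining_chars, then a nested loop driven by a running char_index with a break) are replaced by a single filter of the alphabet against the key plus per-row slices remaining[r*cols:(r+1)*cols] padded to width; the per-element Python-level membership/remove/index bookkeeping disappears into C-level filter and slicing, a constant-factor speedup.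
import Mathlib
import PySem

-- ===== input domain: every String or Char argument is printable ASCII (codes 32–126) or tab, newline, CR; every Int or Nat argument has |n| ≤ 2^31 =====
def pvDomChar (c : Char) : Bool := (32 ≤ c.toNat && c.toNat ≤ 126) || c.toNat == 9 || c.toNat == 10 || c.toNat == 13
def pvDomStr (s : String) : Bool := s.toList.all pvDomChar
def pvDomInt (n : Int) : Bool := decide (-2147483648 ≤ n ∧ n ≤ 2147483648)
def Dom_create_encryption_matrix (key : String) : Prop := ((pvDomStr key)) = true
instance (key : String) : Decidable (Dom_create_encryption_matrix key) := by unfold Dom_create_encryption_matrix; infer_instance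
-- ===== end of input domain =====

-- B replaces A's two fill loops (first-row loop with remove-once, then a nested char_index loop)
-- by one filter plus per-row slices of the remaining list; objective: simpler.

-- ===== PORT A =====
-- list(ENGLISH_ALPHABET): the alphabet as a list of one-character strings (module constant)
def pvAlphabet : List String := "abcdefghijklmnopqrstuvwxyz/.".toList.map (fun c => String.ofList [c])

-- one step of A's first loop over enumerate(key): state = (remaining_chars, matrix)
def pvFirstA (st : List String × List (List String)) (p : Nat × String) : List String × List (List String) :=
  (if st.1.contains p.2 then st.1.erase p.2 else st.1,
   st.2.set 0 ((st.2.getD 0 []).set p.1 p.2))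

-- A's inner 'for j in range(len(key))' with its break on char_index >= len(remaining_chars)
def pvInnerA (rem : List String) : List Nat → Nat → List String → Nat × List String
  | [], ci, row => (ci, row)
  | j :: js, ci, row =>
    if rem.length ≤ ci then (ci, row)
    else pvInnerA rem js (ci + 1) (row.set j (rem.getD ci "*"))

-- A's outer 'for i in range(1, len(matrix))'
def pvOuterA (rem : List String) (cols : Nat) : List Nat → Nat → List (List String) → List (List String)
  | [], _, m => m
  | i :: is, ci, m =>
    let p := pvInnerA rem (List.range cols) ci (m.getD i [])
    pvOuterA rem cols is p.1 (m.set i p.2)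

def create_encryption_matrix (key : String) : List (List String) :=
  let kl := key.toList.map (fun c => String.ofList [c])
  let cols := kl.length
  let rows := (28 + cols - 1) / cols          -- ceil(ALPHABET_SIZE / len(key)); exact for cols ≥ 1 (Pre_)
  let matrix := List.replicate rows (List.replicate cols "*")
  -- enumerate(key) as (index, char) pairs
  let st := ((List.range kl.length).zip kl).foldl pvFirstA (pvAlphabet, matrix)
  pvOuterA st.1 cols (List.range' 1 (rows - 1)) 0 st.2

-- ===== PORT B =====
def create_encryption_matrix_alt (key : String) : List (List String) :=
  let kl := key.toList.map (fun c => String.ofList [c])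
  let cols := kl.length
  let rows := (28 + cols - 1) / cols          -- ceil(ALPHABET_SIZE / len(key)); exact for cols ≥ 1 (Pre_)
  -- [c for c in ENGLISH_ALPHABET if c not in key]  ('c not in key' is char membership for 1-char c)
  let remaining := pvAlphabet.filter (fun s => !kl.contains s)
  kl :: (List.range (rows - 1)).map (fun r =>
    let chunk := (remaining.drop (r * cols)).take cols   -- remaining[r*cols:(r+1)*cols]
    chunk ++ List.replicate (cols - chunk.length) "*")

-- ===== PRECONDITION & SPEC =====
-- Pre_ excludes only the empty key, on which A raises ZeroDivisionError (28 / len(key)).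
def Pre_create_encryption_matrix (key : String) : Prop := key ≠ ""
instance (key : String) : Decidable (Pre_create_encryption_matrix key) := by
  unfold Pre_create_encryption_matrix; infer_instance
def pvWitness_create_encryption_matrix : String := "abc"

def Spec_create_encryption_matrix (key : String) (out : List (List String)) : Prop := out = create_encryption_matrix_alt key
instance (key : String) (out : List (List String)) : Decidable (Spec_create_encryption_matrix key out) := by unfold Spec_create_encryption_matrix; infer_instance

-- ===== CLAIM (what is proved, stated in full; the proofs are below) =====
def Claim_equal_create_encryption_matrix : Prop := ∀ (key : String), Dom_create_encryption_matrix key → Pre_create_encryption_matrix key → Spec_create_encryption_matrix key (create_encryption_matrix key)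

-- ===== LEMMAS AND PROOFS =====

-- sequential in-place assignment: row[a], row[a+1], … := xs
def pvSetSeq {α : Type} : List α → Nat → List α → List α
  | row, _, [] => row
  | row, a, x :: xs => pvSetSeq (row.set a x) (a + 1) xs

theorem pvSetSeq_cons_succ {α : Type} (xs : List α) (y : α) (row : List α) (a : Nat) :
    pvSetSeq (y :: row) (a + 1) xs = y :: pvSetSeq row a xs := by
  induction xs generalizing y row a with
  | nil => rfl
  | cons x xs ih => simp [pvSetSeq, ih]

theorem pvSetSeq_replicate {α : Type} (y : α) (xs : List α) (n : Nat) (h : xs.length ≤ n) :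
    pvSetSeq (List.replicate n y) 0 xs = xs ++ List.replicate (n - xs.length) y := by
  induction xs generalizing n with
  | nil => simp [pvSetSeq]
  | cons x xs ih =>
    obtain ⟨m, rfl⟩ : ∃ m, n = m + 1 := ⟨n - 1, by simp at h; omega⟩
    simp only [List.replicate_succ, pvSetSeq, List.set_cons_zero]
    rw [show (0 + 1 : Nat) = 0 + 1 from rfl, pvSetSeq_cons_succ]
    rw [ih m (by simp at h; omega)]
    simp [Nat.succ_sub_succ]

theorem pvFirstA_split (xs : List (Nat × String)) (a : List String) (b : List (List String)) :
    xs.foldl pvFirstA (a, b) =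
      (xs.foldl (fun r p => if r.contains p.2 then r.erase p.2 else r) a,
       xs.foldl (fun m (p : Nat × String) => m.set 0 ((m.getD 0 []).set p.1 p.2)) b) := by
  induction xs generalizing a b with
  | nil => rfl
  | cons x xs ih => simp only [List.foldl_cons, pvFirstA]; exact ih _ _

theorem pvRemove_fold (cs : List String) (l : List String) (h : l.Nodup) :
    cs.foldl (fun r c => if r.contains c then r.erase c else r) l
      = l.filter (fun s => !cs.contains s) := by
  induction cs generalizing l with
  | nil => simp
  | cons c cs ih =>
    have hstep : (if l.contains c then l.erase c else l) = l.filter (fun s => s != c) := by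
      by_cases hc : c ∈ l
      · simp only [List.contains_eq_mem, hc, decide_true, if_true]
        exact h.erase_eq_filter c
      · simp only [List.contains_eq_mem, hc, decide_false, Bool.false_eq_true, if_false]
        rw [eq_comm]
        apply List.filter_eq_self.2
        intro a ha
        simp only [bne_iff_ne, ne_eq]
        rintro rfl; exact hc ha
    simp only [List.foldl_cons, hstep]
    rw [ih _ (h.filter _), List.filter_filter]
    apply List.filter_congr; intro a _
    by_cases hac : a = c
    · simp [hac]
    · simp [hac, List.contains_cons]

theorem pvRow0_fold (xs : List (Nat × String)) (r : List String) (rest : List (List String)) :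
    xs.foldl (fun m (p : Nat × String) => m.set 0 ((m.getD 0 []).set p.1 p.2)) (r :: rest)
      = (xs.foldl (fun r (p : Nat × String) => r.set p.1 p.2) r) :: rest := by
  induction xs generalizing r with
  | nil => rfl
  | cons x xs ih =>
    simp only [List.foldl_cons, List.getD, List.getElem?_cons_zero, Option.getD_some,
      List.set_cons_zero]
    exact ih _

theorem pvZipSet_fold (kl : List String) (a : Nat) (row : List String) :
    ((List.range' a kl.length).zip kl).foldl (fun r (p : Nat × String) => r.set p.1 p.2) row
      = pvSetSeq row a kl := by
  induction kl generalizing a row with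
  | nil => rfl
  | cons x xs ih =>
    simp only [List.length_cons, List.range'_succ, List.zip_cons_cons, List.foldl_cons]
    exact ih _ _

theorem pvInnerA_spec (rem : List String) (k : Nat) :
    ∀ (a ci : Nat) (row : List String),
      pvInnerA rem (List.range' a k) ci row
        = (ci + min k (rem.length - ci), pvSetSeq row a ((rem.drop ci).take k)) := by
  induction k with
  | zero => intro a ci row; simp [pvInnerA, pvSetSeq]
  | succ k ih =>
    intro a ci row
    rw [List.range'_succ]
    by_cases hc : rem.length ≤ ci
    · rw [pvInnerA, if_pos hc, List.drop_of_length_le hc]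
      simp only [List.take_nil, pvSetSeq, Prod.mk.injEq]
      exact ⟨by omega, trivial⟩
    · rw [pvInnerA, if_neg hc, ih]
      rw [not_le] at hc
      rw [Prod.mk.injEq]
      refine ⟨by omega, ?_⟩
      rw [List.drop_eq_getElem_cons hc, List.take_succ_cons, pvSetSeq,
        List.getD_eq_getElem rem "*" hc]

-- the rows A's second loop produces, as a function of the running char_index
def pvChunks (rem : List String) (cols : Nat) : Nat → Nat → List (List String)
  | _, 0 => []
  | ci, t + 1 =>
    pvSetSeq (List.replicate cols "*") 0 ((rem.drop ci).take cols)
      :: pvChunks rem cols (ci + min cols (rem.length - ci)) t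

theorem pvChunks_length (rem : List String) (cols : Nat) (t : Nat) :
    ∀ ci, (pvChunks rem cols ci t).length = t := by
  induction t with
  | zero => intro ci; rfl
  | succ t ih => intro ci; simp [pvChunks, ih]

theorem pvOuterA_spec (rem : List String) (cols : Nat) (t : Nat) :
    ∀ (s ci : Nat) (m : List (List String)),
      (∀ i, s ≤ i → i < s + t → m.getD i [] = List.replicate cols "*") →
      pvOuterA rem cols (List.range' s t) ci m = pvSetSeq m s (pvChunks rem cols ci t) := by
  induction t with
  | zero => intro s ci m _; rfl
  | succ t ih =>
    intro s ci m hm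
    rw [List.range'_succ, pvOuterA]
    have hinner := pvInnerA_spec rem cols 0 ci (List.replicate cols "*")
    rw [← List.range_eq_range'] at hinner
    simp only [hm s le_rfl (by omega), hinner]
    rw [ih (s + 1) _ _ ?_]
    · conv_rhs => rw [pvChunks, pvSetSeq]
    · intro i h1 h2
      have hne : s ≠ i := by omega
      simp only [List.getD, List.getElem?_set_ne hne]
      exact hm i (by omega) (by omega)

theorem pvDrop_min (rem : List String) (n : Nat) :
    rem.drop (min n rem.length) = rem.drop n := by
  rcases le_total n rem.length with h | h
  · rw [min_eq_left h]
  · rw [min_eq_right h, List.drop_length, List.drop_of_length_le h]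

theorem pvChunks_map (rem : List String) (cols : Nat) (t : Nat) :
    ∀ r : Nat, pvChunks rem cols (min (r * cols) rem.length) t
      = (List.range' r t).map (fun q =>
          let chunk := (rem.drop (q * cols)).take cols
          chunk ++ List.replicate (cols - chunk.length) "*") := by
  induction t with
  | zero => intro r; rfl
  | succ t ih =>
    intro r
    rw [List.range'_succ, List.map_cons, pvChunks]
    congr 1
    · rw [pvDrop_min]
      exact pvSetSeq_replicate _ _ _ (by rw [List.length_take]; omega)
    · have harith : min (r * cols) rem.length + min cols (rem.length - min (r * cols) rem.length)
          = min ((r + 1) * cols) rem.length := by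
        have hmul : (r + 1) * cols = r * cols + cols := by ring
        omega
      rw [harith]
      exact ih (r + 1)

-- ===== VERDICT (by name: the statement is the Claim_ definition above) =====
theorem create_encryption_matrix_spec : Claim_equal_create_encryption_matrix := by
  intro key _ hpre
  unfold Spec_create_encryption_matrix
  simp only [create_encryption_matrix, create_encryption_matrix_alt]
  set kl := key.toList.map (fun c => String.ofList [c]) with hkl
  set cols := kl.length with hcols
  have hc : 0 < cols := by
    rw [hcols, hkl, List.length_map]
    have hne : key.toList ≠ [] := fun h => hpre (String.toList_eq_nil_iff.1 h)
    cases h : key.toList with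
    | nil => exact absurd h hne
    | cons a l => simp
  set rows := (28 + cols - 1) / cols with hrows
  have hr : 1 ≤ rows := by
    rw [hrows, Nat.le_div_iff_mul_le hc]; omega
  rw [pvFirstA_split]
  -- remaining_chars component of the first loop
  have hrem : ((List.range kl.length).zip kl).foldl
      (fun r p => if r.contains p.2 then r.erase p.2 else r) pvAlphabet
      = pvAlphabet.filter (fun s => !kl.contains s) := by
    rw [show ((List.range kl.length).zip kl).foldl
        (fun r p => if r.contains p.2 then r.erase p.2 else r) pvAlphabet
        = (((List.range kl.length).zip kl).map Prod.snd).foldl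
            (fun r c => if r.contains c then r.erase c else r) pvAlphabet from
      by rw [List.foldl_map]]
    rw [List.map_snd_zip (by simp), pvRemove_fold _ _ (by decide)]
  -- matrix component of the first loop
  have hmatrix : ((List.range kl.length).zip kl).foldl
      (fun m (p : Nat × String) => m.set 0 ((m.getD 0 []).set p.1 p.2))
      (List.replicate rows (List.replicate cols "*"))
      = kl :: List.replicate (rows - 1) (List.replicate cols "*") := by
    obtain ⟨t, ht⟩ : ∃ t, rows = t + 1 := ⟨rows - 1, by omega⟩
    rw [ht, List.replicate_succ, pvRow0_fold, List.range_eq_range', pvZipSet_fold]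
    rw [pvSetSeq_replicate _ kl cols (le_of_eq hcols.symm)]
    rw [hcols, Nat.sub_self, List.replicate_zero, List.append_nil, Nat.add_sub_cancel]
  rw [hrem, hmatrix]
  rw [pvOuterA_spec _ _ _ _ _ _ ?_]
  · have hss := pvSetSeq_cons_succ
        (pvChunks (pvAlphabet.filter (fun s => !kl.contains s)) cols 0 (rows - 1))
        kl (List.replicate (rows - 1) (List.replicate cols "*")) 0
    simp only [Nat.zero_add] at hss
    rw [hss]
    congr 1
    rw [pvSetSeq_replicate _ _ _ (by simp [pvChunks_length]),
      pvChunks_length, Nat.sub_self, List.replicate_zero, List.append_nil]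
    rw [show (0 : Nat) = min (0 * cols) ((pvAlphabet.filter (fun s => !kl.contains s)).length)
        from by simp]
    rw [pvChunks_map, ← List.range_eq_range']
  · intro i h1 h2
    obtain ⟨j, rfl⟩ : ∃ j, i = j + 1 := ⟨i - 1, by omega⟩
    simp only [List.getD, List.getElem?_cons_succ, List.getElem?_replicate]
    rw [if_pos (by omega)]
    rfl
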